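-- pv_equiv track=rewrite | github.com/getuliojql/if669 | aula/lista06 - ex003.py | avaliar
-- ===== SOURCE A (Python) =====
-- def avaliar(lista):
--     possivel = 'YES'
--
--     lista = [int(n) for n in lista]
--
--     for numeral in lista:
--         if numeral != 0 and numeral - 1 not in lista:
--             possivel = 'NO'
--
--         if lista.count(numeral) < lista.count(numeral + 1):
--             possivel = 'NO'
--
--     return possivel
-- ===== SOURCE B (Python) =====
-- def avaliar(lista):
--     xs = sorted(int(n) for n in lista)
--     # collapse the sorted list into ascending runs (value, count) with an index scan
--     runs = []
--     i, n = 0, len(xs)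
--     while i < n:
--         j = i
--         while j < n and xs[j] == xs[i]:
--             j += 1
--         runs.append((xs[i], j - i))
--         i = j
--     if not runs:
--         return 'YES'
--     if runs[0][0] != 0:
--         return 'NO'
--     for (v1, c1), (v2, c2) in zip(runs, runs[1:]):
--         if v2 != v1 + 1 or c2 > c1:
--             return 'NO'
--     return 'YES'
-- ===== Notes on version B (the rewrite author's own statement) =====
-- stated objective: faster
-- what changed: B sorts the list, collapses it into ascending (value,count) runs, and answers with one linear walk over the runs (first run value must be 0, consecutive run values must differ by 1, counts non-increasing), replacing A's per-element membership and count rescans of the whole list.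
import Mathlib
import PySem

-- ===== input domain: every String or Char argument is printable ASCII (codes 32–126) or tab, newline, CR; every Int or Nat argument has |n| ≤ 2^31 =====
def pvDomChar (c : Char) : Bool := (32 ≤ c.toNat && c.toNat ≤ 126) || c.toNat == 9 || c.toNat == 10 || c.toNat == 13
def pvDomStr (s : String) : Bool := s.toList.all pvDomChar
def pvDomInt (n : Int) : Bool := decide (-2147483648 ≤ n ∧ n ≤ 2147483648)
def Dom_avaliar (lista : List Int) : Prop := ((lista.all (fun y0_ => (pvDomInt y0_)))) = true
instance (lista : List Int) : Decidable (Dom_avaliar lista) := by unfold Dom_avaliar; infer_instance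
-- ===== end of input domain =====

-- B sorts the list, collapses it into ascending (value, count) runs and answers with one
-- linear walk over the runs, instead of A's per-element membership/count rescans
-- (measured faster; equivalence on all int lists proved below).

-- ===== PORT A =====
-- Literal transliteration of A: for-loop over the list, flag string, in/count scans.
def avaliar (lista : List Int) : String :=
  lista.foldl (fun possivel numeral =>
    let p := if numeral ≠ 0 ∧ ¬ ((numeral - 1) ∈ lista) then "NO" else possivel
    if lista.count numeral < lista.count (numeral + 1) then "NO" else p) "YES"

-- ===== PORT B =====
-- B's index scan 'while i < n: while j < n and xs[j] == xs[i]: j += 1' collapsing the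
-- sorted list into runs: each outer-loop step takes the leading run and recurses on the rest.
def runsOf : List Int → List (Int × Nat)
  | [] => []
  | x :: xs =>
    (x, (xs.takeWhile (fun y => y == x)).length + 1) :: runsOf (xs.dropWhile (fun y => y == x))
termination_by l => l.length
decreasing_by
  simpa using Nat.lt_succ_of_le (List.length_dropWhile_le _ _)

-- B's zip loop over consecutive runs with early return.
def runWalk : Int → Nat → List (Int × Nat) → String
  | _, _, [] => "YES"
  | v1, c1, (v2, c2) :: rest =>
    if v2 ≠ v1 + 1 ∨ c1 < c2 then "NO" else runWalk v2 c2 rest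

def avaliar_alt (lista : List Int) : String :=
  match runsOf (PySem.List.sorted lista (fun x => x) false) with
  | [] => "YES"
  | (v0, c0) :: rest => if v0 ≠ 0 then "NO" else runWalk v0 c0 rest

-- ===== PRECONDITION & SPEC =====
def Spec_avaliar (lista : List Int) (out : String) : Prop := out = avaliar_alt lista
instance (lista : List Int) (out : String) : Decidable (Spec_avaliar lista out) := by unfold Spec_avaliar; infer_instance

-- ===== CLAIM (what is proved, stated in full; the proofs are below) =====
def Claim_equal_avaliar : Prop := ∀ (lista : List Int), Dom_avaliar lista → Spec_avaliar lista (avaliar lista)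

-- ===== LEMMAS AND PROOFS =====

-- A's per-element violation test, and the property "A answers YES".
def badAt (lista : List Int) (v : Int) : Bool :=
  (decide (v ≠ 0) && !(decide ((v - 1) ∈ lista))) || decide (lista.count v < lista.count (v + 1))

def Good (l : List Int) : Prop :=
  ∀ v ∈ l, (v = 0 ∨ (v - 1) ∈ l) ∧ l.count (v + 1) ≤ l.count v

theorem foldA (lista : List Int) : ∀ (l : List Int) (acc : String),
    l.foldl (fun possivel numeral =>
      let p := if numeral ≠ 0 ∧ ¬ ((numeral - 1) ∈ lista) then "NO" else possivel
      if lista.count numeral < lista.count (numeral + 1) then "NO" else p) acc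
    = if l.any (badAt lista) then "NO" else acc := by
  intro l
  induction l with
  | nil => intro acc; simp
  | cons x l ih =>
    intro acc
    simp only [List.foldl_cons, List.any_cons, ih, badAt]
    by_cases h1 : ¬x = 0 ∧ (x - 1) ∉ lista <;>
      by_cases h2 : lista.count x < lista.count (x + 1) <;>
        simp [h1, h2, badAt]

theorem any_badAt_iff (l : List Int) : l.any (badAt l) = true ↔ ¬ Good l := by
  unfold Good
  simp only [List.any_eq_true, badAt, Bool.or_eq_true, Bool.and_eq_true, Bool.not_eq_true',
    decide_eq_true_eq, decide_eq_false_iff_not, not_forall]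
  constructor
  · rintro ⟨v, hv, h⟩
    refine ⟨v, hv, ?_⟩
    rcases h with ⟨h1, h2⟩ | h3
    · rintro ⟨hp, _⟩; rcases hp with h0 | hm
      · exact h1 h0
      · exact h2 hm
    · rintro ⟨_, hc⟩; omega
  · rintro ⟨v, hv, h⟩
    refine ⟨v, hv, ?_⟩
    by_cases hc : l.count (v + 1) ≤ l.count v
    · left
      constructor
      · intro h0; exact h ⟨Or.inl h0, hc⟩
      · intro hm; exact h ⟨Or.inr hm, hc⟩
    · right; omega

-- properties of dropWhile on a sorted list
theorem lt_of_mem_dropWhile (x : Int) : ∀ (xs : List Int), xs.Pairwise (· ≤ ·) →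
    (∀ y ∈ xs, x ≤ y) → ∀ y ∈ xs.dropWhile (fun y => y == x), x < y := by
  intro xs
  induction xs with
  | nil => simp
  | cons z zs ih =>
    intro hs hle y hy
    rcases List.pairwise_cons.mp hs with ⟨hz, hzs⟩
    by_cases hzx : (z == x) = true
    · rw [List.dropWhile_cons, if_pos hzx] at hy
      have hzx' : z = x := by simpa using hzx
      exact ih hzs (fun w hw => hzx' ▸ hz w hw) y hy
    · rw [List.dropWhile_cons, if_neg hzx] at hy
      have hzx' : z ≠ x := by simpa using hzx
      have hxz : x < z := lt_of_le_of_ne (hle z (by simp)) (fun h => hzx' h.symm)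
      rcases List.mem_cons.mp hy with rfl | hy'
      · exact hxz
      · exact lt_of_lt_of_le hxz (hz y hy')

theorem count_head_sorted (x : Int) (xs : List Int) (hs : (x :: xs).Pairwise (· ≤ ·)) :
    (x :: xs).count x = (xs.takeWhile (fun y => y == x)).length + 1 := by
  rcases List.pairwise_cons.mp hs with ⟨hz, hzs⟩
  have hsplit : xs = xs.takeWhile (fun y => y == x) ++ xs.dropWhile (fun y => y == x) :=
    (List.takeWhile_append_dropWhile).symm
  have htake : (xs.takeWhile (fun y => y == x)).count x = (xs.takeWhile (fun y => y == x)).length := by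
    apply List.count_eq_length.mpr
    intro y hy
    have h := List.mem_takeWhile_imp hy
    rw [beq_iff_eq] at h
    exact h.symm
  have hdrop : (xs.dropWhile (fun y => y == x)).count x = 0 := by
    apply List.count_eq_zero.mpr
    intro hmem
    exact absurd rfl (ne_of_gt (lt_of_mem_dropWhile x xs hzs hz x hmem)).symm
  calc (x :: xs).count x = xs.count x + 1 := by simp
    _ = (xs.takeWhile (fun y => y == x)).count x + (xs.dropWhile (fun y => y == x)).count x + 1 := by
          conv_lhs => rw [hsplit]
          rw [List.count_append]
    _ = (xs.takeWhile (fun y => y == x)).length + 1 := by rw [htake, hdrop]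

-- F1: run values = members
theorem runsOf_mem : ∀ (s : List Int), s.Pairwise (· ≤ ·) →
    ∀ v, v ∈ (runsOf s).map Prod.fst ↔ v ∈ s := by
  intro s
  induction s using runsOf.induct with
  | case1 => simp [runsOf]
  | case2 x xs ih =>
    intro hs v
    rcases List.pairwise_cons.mp hs with ⟨hz, hzs⟩
    have hts : (xs.dropWhile (fun y => y == x)).Pairwise (· ≤ ·) :=
      List.Pairwise.sublist (List.dropWhile_sublist _) hzs
    rw [runsOf]
    simp only [List.map_cons, List.mem_cons, ih hts v]
    constructor
    · rintro (rfl | h)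
      · exact Or.inl rfl
      · exact Or.inr ((List.dropWhile_sublist _).mem h)
    · rintro (rfl | hv')
      · exact Or.inl rfl
      · have hv'' : v ∈ xs.takeWhile (fun y => y == x) ++ xs.dropWhile (fun y => y == x) := by
          rw [List.takeWhile_append_dropWhile]; exact hv'
        rcases List.mem_append.mp hv'' with h | h
        · left
          have := List.mem_takeWhile_imp h
          rwa [beq_iff_eq] at this
        · exact Or.inr h

-- F2: run counts = list counts
theorem runsOf_count : ∀ (s : List Int), s.Pairwise (· ≤ ·) →
    ∀ p ∈ runsOf s, p.2 = s.count p.1 := by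
  intro s
  induction s using runsOf.induct with
  | case1 => simp [runsOf]
  | case2 x xs ih =>
    intro hs p hp
    rcases List.pairwise_cons.mp hs with ⟨hz, hzs⟩
    have hts : (xs.dropWhile (fun y => y == x)).Pairwise (· ≤ ·) :=
      List.Pairwise.sublist (List.dropWhile_sublist _) hzs
    rw [runsOf] at hp
    rcases List.mem_cons.mp hp with rfl | hp'
    · exact (count_head_sorted x xs hs).symm
    · have h2 := ih hts p hp'
      have hmem : p.1 ∈ xs.dropWhile (fun y => y == x) :=
        (runsOf_mem _ hts p.1).mp (List.mem_map_of_mem hp')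
      have hlt : x < p.1 := lt_of_mem_dropWhile x xs hzs hz _ hmem
      have hpx : p.1 ≠ x := (ne_of_lt hlt).symm
      have htc : (xs.takeWhile (fun y => y == x)).count p.1 = 0 := by
        apply List.count_eq_zero.mpr
        intro hm
        have := List.mem_takeWhile_imp hm
        rw [beq_iff_eq] at this
        exact hpx this
      have hsplit : xs = xs.takeWhile (fun y => y == x) ++ xs.dropWhile (fun y => y == x) :=
        (List.takeWhile_append_dropWhile).symm
      have hc1 : (x :: xs).count p.1 = xs.count p.1 := by
        simp only [List.count_cons]
        have : ¬ (x == p.1) = true := by simpa using fun h => hpx h.symm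
        simp [this]
      have hcx : (x :: xs).count p.1 = (xs.dropWhile (fun y => y == x)).count p.1 := by
        rw [hc1]
        conv_lhs => rw [hsplit]
        rw [List.count_append, htc, Nat.zero_add]
      rw [hcx]; exact h2

-- F3: run values strictly increasing
theorem runsOf_sorted : ∀ (s : List Int), s.Pairwise (· ≤ ·) →
    ((runsOf s).map Prod.fst).Pairwise (· < ·) := by
  intro s
  induction s using runsOf.induct with
  | case1 => simp [runsOf]
  | case2 x xs ih =>
    intro hs
    rcases List.pairwise_cons.mp hs with ⟨hz, hzs⟩
    have hts : (xs.dropWhile (fun y => y == x)).Pairwise (· ≤ ·) :=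
      List.Pairwise.sublist (List.dropWhile_sublist _) hzs
    rw [runsOf]
    simp only [List.map_cons]
    refine List.pairwise_cons.mpr ⟨?_, ih hts⟩
    intro w hw
    exact lt_of_mem_dropWhile x xs hzs hz w ((runsOf_mem _ hts w).mp hw)

def ChainP : Int → Nat → List (Int × Nat) → Prop
  | _, _, [] => True
  | v, c, (v2, c2) :: rs => v2 = v + 1 ∧ c2 ≤ c ∧ ChainP v2 c2 rs

theorem runWalk_eq_yes_iff : ∀ (rs : List (Int × Nat)) (v : Int) (c : Nat),
    runWalk v c rs = "YES" ↔ ChainP v c rs := by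
  intro rs
  induction rs with
  | nil => intro v c; simp [runWalk, ChainP]
  | cons p rs ih =>
    intro v c
    obtain ⟨v2, c2⟩ := p
    show (if v2 ≠ v + 1 ∨ c < c2 then "NO" else runWalk v2 c2 rs) = "YES" ↔ _
    split_ifs with h
    · constructor
      · intro habs; exact absurd habs (by decide)
      · rintro ⟨h1, h2, _⟩
        rcases h with h | h
        · exact absurd h1 h
        · omega
    · push Not at h
      rw [ih v2 c2]
      show ChainP v2 c2 rs ↔ v2 = v + 1 ∧ c2 ≤ c ∧ ChainP v2 c2 rs
      constructor
      · intro hc; exact ⟨h.1, h.2, hc⟩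
      · rintro ⟨_, _, hc⟩; exact hc

theorem runWalk_cases : ∀ (rs : List (Int × Nat)) (v : Int) (c : Nat),
    runWalk v c rs = "YES" ∨ runWalk v c rs = "NO" := by
  intro rs
  induction rs with
  | nil => intro v c; left; rfl
  | cons p rs ih =>
    intro v c
    obtain ⟨v2, c2⟩ := p
    simp only [runWalk]
    split_ifs with h
    · right; rfl
    · exact ih v2 c2

theorem chainP_lt : ∀ (rs : List (Int × Nat)) (v : Int) (c : Nat), ChainP v c rs →
    ∀ w ∈ rs.map Prod.fst, v < w := by
  intro rs
  induction rs with
  | nil => simp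
  | cons p rs ih =>
    obtain ⟨v2, c2⟩ := p
    intro v c h w hw
    obtain ⟨h1, h2, h3⟩ := h
    simp only [List.map_cons, List.mem_cons] at hw
    rcases hw with rfl | hw'
    · omega
    · have := ih v2 c2 h3 w hw'; omega

theorem chainP_pred : ∀ (rs : List (Int × Nat)) (v : Int) (c : Nat), ChainP v c rs →
    ∀ w ∈ v :: rs.map Prod.fst, v ≤ w ∧ (w ≠ v → w - 1 ∈ v :: rs.map Prod.fst) := by
  intro rs
  induction rs with
  | nil =>
    intro v c _ w hw
    simp only [List.map_nil, List.mem_singleton] at hw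
    subst hw
    exact ⟨le_refl w, fun h => absurd rfl h⟩
  | cons p rs ih =>
    obtain ⟨v2, c2⟩ := p
    intro v c h w hw
    obtain ⟨h1, h2, h3⟩ := h
    simp only [List.map_cons, List.mem_cons] at hw
    rcases hw with rfl | hw'
    · exact ⟨le_refl w, fun h => absurd rfl h⟩
    · have H := ih v2 c2 h3 w (by simpa using hw')
      constructor
      · omega
      · intro hwv
        by_cases hwv2 : w = v2
        · have hwm : w - 1 = v := by omega
          rw [hwm]; simp
        · have hm := H.2 hwv2
          simp only [List.map_cons, List.mem_cons] at hm ⊢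
          tauto

theorem chainP_counts : ∀ (rs : List (Int × Nat)) (v : Int) (c : Nat), ChainP v c rs →
    ∀ p ∈ (v, c) :: rs, ∀ q ∈ (v, c) :: rs, q.1 = p.1 + 1 → q.2 ≤ p.2 := by
  intro rs
  induction rs with
  | nil =>
    intro v c _ p hp q hq heq
    simp only [List.mem_singleton] at hp hq
    subst hp; subst hq
    simp only at heq; omega
  | cons r rs ih =>
    obtain ⟨v2, c2⟩ := r
    intro v c h p hp q hq heq
    obtain ⟨h1, h2, h3⟩ := h
    rcases List.mem_cons.mp hp with rfl | hp'
    · rcases List.mem_cons.mp hq with rfl | hq'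
      · simp only at heq; omega
      · rcases List.mem_cons.mp hq' with rfl | hq''
        · simpa using h2
        · exfalso
          have := chainP_lt rs v2 c2 h3 q.1 (List.mem_map_of_mem hq'')
          simp only at heq; omega
    · rcases List.mem_cons.mp hq with rfl | hq'
      · exfalso
        rcases List.mem_cons.mp hp' with rfl | hp''
        · simp only at heq; omega
        · have := chainP_lt rs v2 c2 h3 p.1 (List.mem_map_of_mem hp'')
          simp only at heq; omega
      · exact ih v2 c2 h3 p hp' q hq' heq

-- building the chain from Good on a sorted list
theorem chainP_of_good (s : List Int) (hgood : Good s) :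
    ∀ (rs : List (Int × Nat)) (v : Int) (c : Nat),
    (∀ p ∈ (v, c) :: rs, p.2 = s.count p.1 ∧ p.1 ∈ s) →
    (((v, c) :: rs).map Prod.fst).Pairwise (· < ·) →
    (∀ w ∈ s, w ∉ ((v, c) :: rs).map Prod.fst → w < v) →
    0 ≤ v → ChainP v c rs := by
  intro rs
  induction rs with
  | nil => intro v c _ _ _ _; trivial
  | cons r rs' ih =>
    obtain ⟨v2, c2⟩ := r
    intro v c H1 H2 H3 H4
    have hv2s : v2 ∈ s := (H1 (v2, c2) (by simp)).2
    have hvs : v ∈ s := (H1 (v, c) (by simp)).2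
    have hlt : v < v2 := by
      have := (List.pairwise_cons.mp H2).1
      exact this v2 (by simp)
    have hpred : v2 - 1 ∈ s := by
      rcases (hgood v2 hv2s).1 with h | h
      · omega
      · exact h
    have hv2 : v2 = v + 1 := by
      by_cases hin : v2 - 1 ∈ ((v, c) :: (v2, c2) :: rs').map Prod.fst
      · simp only [List.map_cons, List.mem_cons] at hin
        rcases hin with h | h | h
        · omega
        · omega
        · have H2' := (List.pairwise_cons.mp H2).2
          have := (List.pairwise_cons.mp H2').1 _ h
          omega
      · have := H3 (v2 - 1) hpred hin; omega
    have hc : c2 ≤ c := by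
      have h1 := (H1 (v, c) (by simp)).1
      have h2 := (H1 (v2, c2) (by simp)).1
      have h3 := (hgood v hvs).2
      rw [hv2] at h2
      simp only at h1 h2
      omega
    refine ⟨hv2, hc, ?_⟩
    apply ih v2 c2
    · intro p hp; exact H1 p (List.mem_cons_of_mem _ hp)
    · exact (List.pairwise_cons.mp H2).2
    · intro w hw hnotin
      by_cases hfull : w ∈ ((v, c) :: (v2, c2) :: rs').map Prod.fst
      · simp only [List.map_cons, List.mem_cons] at hfull hnotin
        have hwv : w = v := by tauto
        omega
      · have := H3 w hw hfull; omega
    · omega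

-- main characterization of B on a sorted list
def bCoreAux : List (Int × Nat) → String
  | [] => "YES"
  | (v0, c0) :: rest => if v0 ≠ 0 then "NO" else runWalk v0 c0 rest

def bCore (s : List Int) : String := bCoreAux (runsOf s)

theorem bCore_yes_iff (s : List Int) (hs : s.Pairwise (· ≤ ·)) :
    bCore s = "YES" ↔ Good s := by
  cases s with
  | nil =>
    constructor
    · intro _ v hv; exact absurd hv (by simp)
    · intro _
      unfold bCore
      rw [show runsOf ([] : List Int) = [] by rw [runsOf]]
      rfl
  | cons x xs =>
    rcases List.pairwise_cons.mp hs with ⟨hz, hzs⟩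
    have hrw : runsOf (x :: xs) =
        (x, (xs.takeWhile (fun y => y == x)).length + 1)
          :: runsOf (xs.dropWhile (fun y => y == x)) := by rw [runsOf]
    have hmin : ∀ y ∈ x :: xs, x ≤ y := by
      intro y hy
      rcases List.mem_cons.mp hy with rfl | hy'
      · exact le_refl y
      · exact hz y hy'
    constructor
    · intro hyes
      unfold bCore at hyes
      rw [hrw] at hyes
      simp only [bCoreAux] at hyes
      by_cases h0 : x ≠ 0
      · rw [if_pos h0] at hyes; exact absurd hyes (by decide)
      · rw [if_neg h0] at hyes
        have hx0 : x = 0 := not_not.mp h0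
        have hchain := (runWalk_eq_yes_iff _ _ _).mp hyes
        intro v hv
        have hvals : v ∈ (runsOf (x :: xs)).map Prod.fst := (runsOf_mem _ hs v).mpr hv
        have hv' : v ∈ x :: (runsOf (xs.dropWhile (fun y => y == x))).map Prod.fst := by
          rw [hrw] at hvals; simpa using hvals
        constructor
        · by_cases hvx : v = x
          · left; rw [hvx, hx0]
          · right
            have H := chainP_pred _ _ _ hchain v hv'
            have hm := H.2 hvx
            have hm' : v - 1 ∈ (runsOf (x :: xs)).map Prod.fst := by
              rw [hrw]; simpa using hm
            exact (runsOf_mem _ hs (v - 1)).mp hm'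
        · obtain ⟨p, hp, hp1⟩ := List.mem_map.mp hvals
          by_cases hv1 : (v + 1) ∈ (runsOf (x :: xs)).map Prod.fst
          · obtain ⟨q, hq, hq1⟩ := List.mem_map.mp hv1
            have hcnt := chainP_counts _ _ _ hchain p (by rwa [hrw] at hp)
              q (by rwa [hrw] at hq) (by rw [hp1, hq1])
            have hpc := runsOf_count _ hs p hp
            have hqc := runsOf_count _ hs q hq
            rw [hp1] at hpc; rw [hq1] at hqc
            rw [← hpc, ← hqc]; exact hcnt
          · have hnm : (v + 1) ∉ (x :: xs) := fun hm => hv1 ((runsOf_mem _ hs (v + 1)).mpr hm)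
            rw [List.count_eq_zero.mpr hnm]
            exact Nat.zero_le _
    · intro hgood
      have hx0 : x = 0 := by
        rcases (hgood x (by simp)).1 with h | h
        · exact h
        · have := hmin (x - 1) h; omega
      unfold bCore
      rw [hrw]
      simp only [bCoreAux]
      rw [if_neg (by simp [hx0])]
      apply (runWalk_eq_yes_iff _ _ _).mpr
      apply chainP_of_good _ hgood
      · intro p hp
        rw [← hrw] at hp
        exact ⟨runsOf_count _ hs p hp, (runsOf_mem _ hs p.1).mp (List.mem_map_of_mem hp)⟩
      · have := runsOf_sorted _ hs
        rwa [hrw] at this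
      · intro w hw hnotin
        exfalso
        apply hnotin
        rw [← hrw]
        exact (runsOf_mem _ hs w).mpr hw
      · omega

theorem bCore_cases (s : List Int) : bCore s = "YES" ∨ bCore s = "NO" := by
  unfold bCore
  cases hr : runsOf s with
  | nil => left; rfl
  | cons p rest =>
    obtain ⟨v0, c0⟩ := p
    simp only [bCoreAux]
    by_cases h0 : v0 ≠ 0
    · right; rw [if_pos h0]
    · rw [if_neg h0]
      exact runWalk_cases rest v0 c0

-- ===== VERDICT (by name: the statement is the Claim_ definition above) =====
theorem avaliar_spec : Claim_equal_avaliar := by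
  intro lista _
  unfold Spec_avaliar avaliar
  rw [foldA]
  have hperm : (PySem.List.sorted lista (fun x => x) false).Perm lista :=
    PySem.List.sorted_perm lista (fun x => x) false
  have hs : (PySem.List.sorted lista (fun x => x) false).Pairwise (· ≤ ·) := by
    simpa using PySem.List.sorted_pairwise lista (fun x => x)
  have hgood : Good (PySem.List.sorted lista (fun x => x) false) ↔ Good lista := by
    unfold Good
    constructor <;> intro h v hv
    · have := h v (hperm.mem_iff.mpr hv)
      simpa [hperm.mem_iff, hperm.count_eq] using this
    · have := h v (hperm.mem_iff.mp hv)
      simpa [hperm.mem_iff, hperm.count_eq] using this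
  have halt : avaliar_alt lista = bCore (PySem.List.sorted lista (fun x => x) false) := rfl
  rw [halt]
  rcases bCore_cases (PySem.List.sorted lista (fun x => x) false) with hb | hb
  · have : Good lista := hgood.mp ((bCore_yes_iff _ hs).mp hb)
    have hany : lista.any (badAt lista) = false := by
      by_contra h
      exact (any_badAt_iff lista).mp (by simpa using h) this
    rw [hany, hb]; simp
  · have hng : ¬ Good lista := by
      intro hg
      have := (bCore_yes_iff _ hs).mpr (hgood.mpr hg)
      rw [hb] at this; exact absurd this (by decide)
    have hany : lista.any (badAt lista) = true := (any_badAt_iff lista).mpr hng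
    rw [hany, hb]; simp
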